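-- pv_equiv track=rewrite | github.com/tornari2/MiddleSchoolPersonalizedVocabRec | test_vocabulary_profiling.py | group_data_by_student
-- ===== SOURCE A (Python) =====
-- def group_data_by_student(data: list) -> dict:
--     """Group data samples by student ID."""
--     students = {}
--     for item in data:
--         student_id = item['student_id']
--         if student_id not in students:
--             students[student_id] = []
--         students[student_id].append(item)
--     return students
-- ===== SOURCE B (Python) =====
-- def group_data_by_student(data: list) -> dict:
--     """Group data samples by student ID (dedup-then-filter decomposition)."""
--     ids = list(dict.fromkeys(item['student_id'] for item in data))
--     return {sid: [item for item in data if item['student_id'] == sid] for sid in ids}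
-- ===== Notes on version B (the rewrite author's own statement) =====
-- stated objective: alternative
-- what changed: A builds the groups incrementally in one pass appending to per-key lists; B first collects the distinct student ids in order of first appearance (dict.fromkeys) and then builds each group by filtering the whole input per id, as two comprehensions.
import Mathlib
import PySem

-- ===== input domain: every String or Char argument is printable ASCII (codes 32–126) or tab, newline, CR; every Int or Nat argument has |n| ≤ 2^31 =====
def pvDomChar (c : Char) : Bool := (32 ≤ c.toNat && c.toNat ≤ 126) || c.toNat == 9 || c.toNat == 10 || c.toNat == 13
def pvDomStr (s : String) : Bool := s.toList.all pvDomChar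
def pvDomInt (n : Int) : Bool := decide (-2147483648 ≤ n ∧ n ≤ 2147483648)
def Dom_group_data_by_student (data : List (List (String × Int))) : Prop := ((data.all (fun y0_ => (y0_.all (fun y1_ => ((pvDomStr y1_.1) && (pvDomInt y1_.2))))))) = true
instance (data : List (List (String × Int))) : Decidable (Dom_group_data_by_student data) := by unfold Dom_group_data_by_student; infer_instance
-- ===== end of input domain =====

-- B replaces A's incremental one-pass grouping by a dedup-of-ids-then-filter-per-id decomposition (same results, alternative structure, not faster).


-- item['student_id'] (first match in the association list; Pre_ guarantees the key is present, so the default is never used)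
def pvSid (item : List (String × Int)) : Int := (List.lookup "student_id" item).getD 0

-- ===== PORT A =====
def group_data_by_student (data : List (List (String × Int))) : List (Int × List (List (String × Int))) :=
  (data.foldl
    (fun (students : PySem.Dict Int (List (List (String × Int)))) item =>
      let student_id := pvSid item
      let students := if students.contains student_id then students else students.insert student_id []
      students.modify student_id [] (fun l => l ++ [item]))
    PySem.Dict.empty).items

-- ===== PORT B =====
def group_data_by_student_alt (data : List (List (String × Int))) : List (Int × List (List (String × Int))) :=
  let ids := PySem.List.dedup (data.map pvSid)
  ids.map (fun sid => (sid, data.filter (fun item => pvSid item == sid)))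

-- ===== PRECONDITION & SPEC =====
-- Pre_ excludes exactly the items without a 'student_id' key, on which Python A raises KeyError.
def Pre_group_data_by_student (data : List (List (String × Int))) : Prop :=
  ∀ item ∈ data, (List.lookup "student_id" item).isSome = true
instance (data : List (List (String × Int))) : Decidable (Pre_group_data_by_student data) := by unfold Pre_group_data_by_student; infer_instance
def pvWitness_group_data_by_student : (List (List (String × Int))) := [[("student_id", 1), ("score", 5)], [("student_id", 2)], [("student_id", 1)]]

def Spec_group_data_by_student (data : List (List (String × Int))) (out : List (Int × List (List (String × Int)))) : Prop := out = group_data_by_student_alt data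
instance (data : List (List (String × Int))) (out : List (Int × List (List (String × Int)))) : Decidable (Spec_group_data_by_student data out) := by unfold Spec_group_data_by_student; infer_instance

-- ===== CLAIM (what is proved, stated in full; the proofs are below) =====
def Claim_equal_group_data_by_student : Prop := ∀ (data : List (List (String × Int))), Dom_group_data_by_student data → Pre_group_data_by_student data → Spec_group_data_by_student data (group_data_by_student data)

-- ===== LEMMAS AND PROOFS =====

-- A's loop body (guarded insert of [], then append) is one Dict.modify.
theorem pvStepA_eq (d : PySem.Dict Int (List (List (String × Int)))) (item : List (String × Int)) :
    (let student_id := pvSid item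
     let students := if d.contains student_id then d else d.insert student_id []
     students.modify student_id [] (fun l => l ++ [item]))
    = d.modify (pvSid item) [] (fun l => l ++ [item]) := by
  by_cases h : d.contains (pvSid item)
  · simp [h]
  · have h' : d.contains (pvSid item) = false := by simpa using h
    simp [h', PySem.Dict.modify, PySem.Dict.getD_insert_self, PySem.Dict.insert_insert_self,
      PySem.Dict.getD_of_not_contains]

theorem pvFold_getD (data : List (List (String × Int))) (c : Int) :
    ((data.foldl (fun (d : PySem.Dict Int (List (List (String × Int)))) item =>
        d.modify (pvSid item) [] (fun l => l ++ [item])) PySem.Dict.empty).getD c [])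
    = data.filter (fun item => pvSid item == c) := by
  have h := PySem.Dict.getD_foldl_modify_append
    (l := data.map (fun item => (pvSid item, item)))
    (d := (PySem.Dict.empty : PySem.Dict Int (List (List (String × Int))))) (c := c)
  rw [List.foldl_map] at h
  simpa [List.filter_map, List.map_map, Function.comp_def] using h

-- ===== VERDICT (by name: the statement is the Claim_ definition above) =====
theorem group_data_by_student_spec : Claim_equal_group_data_by_student := by
  intro data _ _
  show group_data_by_student data = group_data_by_student_alt data
  unfold group_data_by_student group_data_by_student_alt
  have hstep : (fun (d : PySem.Dict Int (List (List (String × Int)))) item =>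
      let student_id := pvSid item
      let students := if d.contains student_id then d else d.insert student_id []
      students.modify student_id [] (fun l => l ++ [item]))
    = fun d item => d.modify (pvSid item) [] (fun l => l ++ [item]) :=
    funext fun d => funext fun item => pvStepA_eq d item
  rw [hstep]
  have hnd : ((data.foldl (fun (d : PySem.Dict Int (List (List (String × Int)))) item =>
      d.modify (pvSid item) [] (fun l => l ++ [item])) PySem.Dict.empty).keys).Nodup :=
    PySem.Dict.nodup_keys_foldl_modify_key data pvSid [] (fun _ item => fun l => l ++ [item])
      PySem.Dict.empty (by simp)
  rw [PySem.Dict.items_eq_map_keys _ hnd []]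
  rw [PySem.Dict.keys_foldl_modify_key]
  simp only [pvFold_getD, PySem.Dict.keys_empty, PySem.Set.update_nil_left,
    PySem.List.dedup_eq_ofList]
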